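-- pv_equiv track=rewrite | github.com/timwonderer/quadraticformulasolver | square_root_simplifier.py | divisible_by_eleven
-- ===== SOURCE A (Python) =====
-- def divisible_by_eleven(num, prime_factors):
--   if num < 11:
--     return (num, prime_factors)
--   elif 11 not in prime_factors:
--     return (num, prime_factors)
--   else:
--     divisible_by_eleven_test = 0
--     digit_list = list(str(num))
--     count = 0
--     # Calculate alternating sum: add then subtract digits.
--     for digit in digit_list:
--         if count == 0:
--             divisible_by_eleven_test = int(digit)
--         elif count % 2 != 0:
--             divisible_by_eleven_test -= int(digit)
--         elif count % 2 == 0: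
--             divisible_by_eleven_test += int(digit)
--         count += 1
--
--     if divisible_by_eleven_test % 11 == 0:
--         prime_factors[11] = 1
--         i = 2
--         while num % (11**i) == 0:
--             prime_factors[11] += 1
--             i += 1
--         num = num // (11 ** prime_factors[11])
--         return (num, prime_factors)
--     else:
--         return (num, prime_factors)
-- ===== SOURCE B (Python) =====
-- def divisible_by_eleven(num, prime_factors):
--     if num < 11 or 11 not in prime_factors:
--         return (num, prime_factors)
--     if num % 11 != 0:
--         return (num, prime_factors)
--     count = 0
--     while num % 11 == 0:
--         num //= 11
--         count += 1
--     prime_factors[11] = count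
--     return (num, prime_factors)
-- ===== Notes on version B (the rewrite author's own statement) =====
-- stated objective: simpler
-- what changed: Replaces the alternating-digit-sum string test with a direct num % 11 == 0 check and replaces the growing-power while loop (num % 11**i) with a single divide-and-count loop that strips factors of 11.
import Mathlib
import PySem

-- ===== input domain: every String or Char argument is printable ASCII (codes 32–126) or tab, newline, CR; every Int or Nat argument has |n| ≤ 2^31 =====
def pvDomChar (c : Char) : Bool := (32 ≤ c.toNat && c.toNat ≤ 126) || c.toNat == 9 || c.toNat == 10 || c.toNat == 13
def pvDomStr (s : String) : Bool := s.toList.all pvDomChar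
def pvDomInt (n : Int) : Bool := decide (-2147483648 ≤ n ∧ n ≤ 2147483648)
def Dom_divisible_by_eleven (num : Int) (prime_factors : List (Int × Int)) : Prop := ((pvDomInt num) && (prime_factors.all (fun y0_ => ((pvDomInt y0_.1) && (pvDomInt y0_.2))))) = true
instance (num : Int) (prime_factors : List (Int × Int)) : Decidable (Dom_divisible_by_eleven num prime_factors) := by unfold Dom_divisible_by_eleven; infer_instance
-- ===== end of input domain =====

-- B replaces A's alternating-digit-sum string test by a direct `num % 11 == 0` check and the
-- growing-power `11**i` loop by a single divide-and-count loop; both mutate prime_factors[11] in place.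


-- ===== PORT A =====
-- one step of A's `for digit in digit_list` loop; state = (divisible_by_eleven_test, count).
-- int(digit) is ported as (PySem.Int.ofChars? [digit]).getD 0 — exact here: the loop only ever
-- receives decimal digit characters of str(num) with num ≥ 11, on which int(..) returns.
def pvStepA (st : Int × Int) (digit : Char) : Int × Int :=
  let dv := (PySem.Int.ofChars? [digit]).getD 0
  (if st.2 = 0 then dv
   else if ¬ PySem.Int.mod st.2 2 = 0 then st.1 - dv
   else st.1 + dv,
   st.2 + 1)

-- A's `while num % (11**i) == 0: prime_factors[11] += 1; i += 1` over the state (prime_factors, i);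
-- `prime_factors[11] += 1` is read-then-write: insert 11 (getD 11 0 + 1) (key 11 is present here).
-- fuel is only a totality guard (the loop runs at most log_11 num < num.toNat times, see the lemmas);
-- 11 ** i is 11 ^ i.toNat — exact since i ≥ 2 throughout.
def pvALoop (num : Int) : Nat → PySem.Dict Int Int → Int → PySem.Dict Int Int
  | 0, d, _ => d
  | fuel + 1, d, i =>
      if PySem.Int.mod num (11 ^ i.toNat) = 0 then
        pvALoop num fuel (d.insert 11 (d.getD 11 0 + 1)) (i + 1)
      else d

def divisible_by_eleven (num : Int) (prime_factors : List (Int × Int)) : Int × (List (Int × Int)) :=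
  if num < 11 then (num, prime_factors)
  else if ¬ (PySem.Dict.mk prime_factors).contains 11 then (num, prime_factors)
  else
    -- digit_list = list(str(num)); the for loop is a foldl with state (test, count) from (0, 0)
    let digit_list := PySem.Int.toChars num
    let tc := List.foldl pvStepA (0, 0) digit_list
    if PySem.Int.mod tc.1 11 = 0 then
      -- prime_factors[11] = 1; i = 2; while-loop; num = num // (11 ** prime_factors[11])
      let d1 := (PySem.Dict.mk prime_factors).insert 11 1
      let dF := pvALoop num num.toNat d1 2
      let e := dF.getD 11 0            -- prime_factors[11]; the key is present
      (PySem.Int.floordiv num (11 ^ e.toNat), dF.items)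
    else (num, prime_factors)

-- ===== PORT B =====
-- B's `while num % 11 == 0: num //= 11; count += 1`; state = (num, count); fuel is a totality guard.
def pvBLoop : Nat → Int → Int → Int × Int
  | 0, n, c => (n, c)
  | fuel + 1, n, c =>
      if PySem.Int.mod n 11 = 0 then
        pvBLoop fuel (PySem.Int.floordiv n 11) (c + 1)
      else (n, c)

def divisible_by_eleven_alt (num : Int) (prime_factors : List (Int × Int)) : Int × (List (Int × Int)) :=
  if num < 11 || ! (PySem.Dict.mk prime_factors).contains 11 then (num, prime_factors)
  else if ¬ PySem.Int.mod num 11 = 0 then (num, prime_factors)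
  else
    let r := pvBLoop num.toNat num 0
    (r.1, ((PySem.Dict.mk prime_factors).insert 11 r.2).items)

-- ===== PRECONDITION & SPEC =====
def Spec_divisible_by_eleven (num : Int) (prime_factors : List (Int × Int)) (out : Int × (List (Int × Int))) : Prop := out = divisible_by_eleven_alt num prime_factors
instance (num : Int) (prime_factors : List (Int × Int)) (out : Int × (List (Int × Int))) : Decidable (Spec_divisible_by_eleven num prime_factors out) := by unfold Spec_divisible_by_eleven; infer_instance

-- ===== CLAIM (what is proved, stated in full; the proofs are below) =====
def Claim_equal_divisible_by_eleven : Prop := ∀ (num : Int) (prime_factors : List (Int × Int)), Dom_divisible_by_eleven num prime_factors → Spec_divisible_by_eleven num prime_factors (divisible_by_eleven num prime_factors)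

-- ===== LEMMAS AND PROOFS =====

-- big-endian decimal digits of n, mirroring Nat.toDigitsCore's recursion
def pvDigits (n : Nat) : List Char :=
  if h : n / 10 = 0 then [Nat.digitChar (n % 10)]
  else pvDigits (n / 10) ++ [Nat.digitChar (n % 10)]
decreasing_by
  refine Nat.div_lt_self ?_ (by omega)
  rcases Nat.eq_zero_or_pos n with h0 | h0
  · rw [h0] at h; simp at h
  · exact h0

theorem pvDigits_length_pos (n : Nat) : 0 < (pvDigits n).length := by
  unfold pvDigits; split <;> simp

theorem pvToDigitsCore_eq (fuel : Nat) : ∀ (n : Nat) (ds : List Char), n ≤ fuel →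
    Nat.toDigitsCore 10 (fuel + 1) n ds = pvDigits n ++ ds := by
  induction fuel with
  | zero =>
    intro n ds h
    interval_cases n
    simp [Nat.toDigitsCore, pvDigits]
  | succ f ih =>
    intro n ds h
    rw [Nat.toDigitsCore]
    by_cases h0 : n / 10 = 0
    · simp [h0, pvDigits]
    · have h10 : 10 ≤ n := by
        by_contra hc
        exact h0 (Nat.div_eq_of_lt (by omega))
      have hlt : n / 10 ≤ f := by
        have := Nat.div_lt_self (by omega : 0 < n) (by omega : 1 < 10)
        omega
      simp only [h0, if_false]
      rw [ih (n / 10) _ hlt]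
      conv_rhs => rw [pvDigits]
      simp [h0, List.append_assoc]

theorem pvToDigits_eq (n : Nat) : Nat.toDigits 10 n = pvDigits n := by
  have := pvToDigitsCore_eq n n [] le_rfl
  simpa [Nat.toDigits] using this

theorem pvDigitVal (r : Nat) (h : r < 10) :
    (PySem.Int.ofChars? [Nat.digitChar r]).getD 0 = (r : Int) := by
  interval_cases r <;> decide

-- sign of the digit at 0-based position j of A's alternating sum (+ at even positions)
def pvSgn (j : Int) : Int := if j % 2 = 0 then 1 else -1

-- A's digit fold over the decimal digits of n, started at count c: the count advances by the number
-- of digits, and the accumulated test changes by ± n modulo 11.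
theorem pvFoldA (n : Nat) : ∀ (t c : Int), (1 ≤ c ∨ (c = 0 ∧ t = 0)) →
    (List.foldl pvStepA (t, c) (pvDigits n)).2 = c + (pvDigits n).length ∧
    ((List.foldl pvStepA (t, c) (pvDigits n)).1 : Int) ≡
      t + pvSgn (c + (pvDigits n).length - 1) * n [ZMOD 11] := by
  induction n using pvDigits.induct with
  | case1 n h0 =>
    intro t c hc
    have hn : n < 10 := by omega
    have hmod : n % 10 = n := Nat.mod_eq_of_lt hn
    rw [pvDigits]
    simp only [h0, dif_pos]
    simp only [List.foldl_cons, List.foldl_nil, List.length_singleton, Nat.cast_one]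
    rw [hmod]
    simp only [pvStepA, pvDigitVal n hn]
    rcases hc with hc | ⟨hc, ht⟩
    · have hne : ¬ c = 0 := by omega
      have hm : PySem.Int.mod c 2 = c % 2 := PySem.Int.mod_eq_emod_of_pos (by norm_num)
      by_cases hpar : c % 2 = 0
      · simp only [hne, if_false, hm, hpar, not_true, if_false]
        refine ⟨trivial, ?_⟩
        have : pvSgn (c + 1 - 1) = 1 := by unfold pvSgn; simp [hpar]
        rw [this]; simp [Int.ModEq]
      · simp only [hne, if_false, hm, hpar, not_false_iff, if_true]
        refine ⟨trivial, ?_⟩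
        have : pvSgn (c + 1 - 1) = -1 := by unfold pvSgn; simp [hpar]
        rw [this]; ring_nf; simp [Int.ModEq]
    · subst hc; subst ht
      simp only [if_pos]
      refine ⟨trivial, ?_⟩
      have : pvSgn (0 + 1 - 1) = 1 := by decide
      rw [this]; simp [Int.ModEq]
  | case2 n h0 ih =>
    intro t c hc
    rw [pvDigits]
    simp only [h0, dif_neg, not_false_iff]
    rw [List.foldl_append]
    obtain ⟨hcnt, hmodeq⟩ := ih t c hc
    set st := List.foldl pvStepA (t, c) (pvDigits (n / 10)) with hst
    have hc' : st.2 = c + (pvDigits (n / 10)).length := hcnt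
    have hc'pos : 1 ≤ st.2 := by
      have := pvDigits_length_pos (n / 10)
      rcases hc with h | ⟨h, _⟩ <;> omega
    have hne : ¬ st.2 = 0 := by omega
    have hm : PySem.Int.mod st.2 2 = st.2 % 2 := PySem.Int.mod_eq_emod_of_pos (by norm_num)
    have hdig : n % 10 < 10 := Nat.mod_lt _ (by omega)
    have hlen : ((pvDigits (n / 10) ++ [Nat.digitChar (n % 10)]).length : Int)
        = (pvDigits (n / 10)).length + 1 := by simp
    have hval : ((n : Int)) ≡ - ((n / 10 : Nat) : Int) + ((n % 10 : Nat) : Int) [ZMOD 11] := by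
      have hsplit : (n : Int) = 10 * ((n / 10 : Nat) : Int) + ((n % 10 : Nat) : Int) := by
        push_cast; omega
      rw [hsplit]
      have : (10 : Int) ≡ -1 [ZMOD 11] := by decide
      calc 10 * ((n / 10 : Nat) : Int) + ((n % 10 : Nat) : Int)
          ≡ -1 * ((n / 10 : Nat) : Int) + ((n % 10 : Nat) : Int) [ZMOD 11] :=
            Int.ModEq.add_right _ (Int.ModEq.mul_right _ this)
        _ = - ((n / 10 : Nat) : Int) + ((n % 10 : Nat) : Int) := by ring
    -- the final step
    simp only [List.foldl_cons, List.foldl_nil, pvStepA, pvDigitVal _ hdig]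
    by_cases hpar : st.2 % 2 = 0
    · simp only [hne, if_false, hm, hpar, not_true, if_false]
      refine ⟨by simp [hc']; ring, ?_⟩
      have hsg : pvSgn (c + ((pvDigits (n / 10)).length + 1) - 1) = 1 := by
        unfold pvSgn; rw [show c + ((pvDigits (n / 10)).length + 1) - 1 = st.2 by omega]
        simp [hpar]
      have hsg' : pvSgn (c + (pvDigits (n / 10)).length - 1) = -1 := by
        unfold pvSgn
        rw [show c + ((pvDigits (n / 10)).length : Int) - 1 = st.2 - 1 by omega]
        have : ¬ (st.2 - 1) % 2 = 0 := by omega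
        simp [this]
      rw [hlen, hsg]
      rw [hsg'] at hmodeq
      calc st.1 + ((n % 10 : Nat) : Int)
          ≡ (t + -1 * ((n / 10 : Nat) : Int)) + ((n % 10 : Nat) : Int) [ZMOD 11] :=
            Int.ModEq.add_right _ hmodeq
        _ = t + (- ((n / 10 : Nat) : Int) + ((n % 10 : Nat) : Int)) := by ring
        _ ≡ t + 1 * (n : Int) [ZMOD 11] := by
            have := hval.symm
            simpa using Int.ModEq.add_left t this
    · simp only [hne, if_false, hm, hpar, not_false_iff, if_true]
      refine ⟨by simp [hc']; ring, ?_⟩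
      have hsg : pvSgn (c + ((pvDigits (n / 10)).length + 1) - 1) = -1 := by
        unfold pvSgn; rw [show c + ((pvDigits (n / 10)).length + 1) - 1 = st.2 by omega]
        simp [hpar]
      have hsg' : pvSgn (c + (pvDigits (n / 10)).length - 1) = 1 := by
        unfold pvSgn
        rw [show c + ((pvDigits (n / 10)).length : Int) - 1 = st.2 - 1 by omega]
        have : (st.2 - 1) % 2 = 0 := by omega
        simp [this]
      rw [hlen, hsg]
      rw [hsg'] at hmodeq
      calc st.1 - ((n % 10 : Nat) : Int)
          ≡ (t + 1 * ((n / 10 : Nat) : Int)) - ((n % 10 : Nat) : Int) [ZMOD 11] :=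
            Int.ModEq.sub_right _ hmodeq
        _ = t + - (- ((n / 10 : Nat) : Int) + ((n % 10 : Nat) : Int)) := by ring
        _ ≡ t + -1 * (n : Int) [ZMOD 11] := by
            have := Int.ModEq.neg hval.symm
            have h2 := Int.ModEq.add_left t this
            simpa using h2

-- the alternating-sum test of A is exactly divisibility by 11
theorem pvTest_iff (n : Nat) :
    (PySem.Int.mod (List.foldl pvStepA (0, 0) (pvDigits n)).1 11 = 0) ↔ (11:Int) ∣ (n:Int) := by
  obtain ⟨-, hmod⟩ := pvFoldA n 0 0 (Or.inr ⟨rfl, rfl⟩)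
  rw [PySem.Int.mod_eq_zero_iff_dvd]
  set T := (List.foldl pvStepA (0, 0) (pvDigits n)).1 with hT
  set s := pvSgn (0 + ((pvDigits n).length : Int) - 1) with hs
  have hsval : s = 1 ∨ s = -1 := by rw [hs]; unfold pvSgn; split <;> simp
  have hTs : T ≡ s * n [ZMOD 11] := by simpa using hmod
  have key : (11:Int) ∣ T ↔ (11:Int) ∣ s * n := by
    constructor <;> intro h
    · exact (Int.modEq_zero_iff_dvd).mp ((hTs.symm).trans ((Int.modEq_zero_iff_dvd).mpr h))
    · exact (Int.modEq_zero_iff_dvd).mp (hTs.trans ((Int.modEq_zero_iff_dvd).mpr h))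
  rw [key]
  rcases hsval with h | h <;> rw [h] <;> simp

-- overwriting the same key twice is one overwrite
theorem pvInsert_insert (d : PySem.Dict Int Int) (k v w : Int) :
    (d.insert k v).insert k w = d.insert k w := by
  apply PySem.Dict.ext
  have h1 : (d.insert k v).contains k = true := PySem.Dict.contains_insert_self d k v
  by_cases hc : d.contains k = true
  · rw [PySem.Dict.items_insert_of_contains _ w h1, PySem.Dict.items_insert_of_contains _ v hc,
        PySem.Dict.items_insert_of_contains _ w hc, List.map_map]
    refine List.map_congr_left ?_
    intro p _
    by_cases hk : (p.1 == k) = true <;> simp [hk, Function.comp]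
  · have hc' : d.contains k = false := by simpa using hc
    rw [PySem.Dict.items_insert_of_contains _ w h1, PySem.Dict.items_insert_of_not_contains _ v hc',
        PySem.Dict.items_insert_of_not_contains _ w hc', List.map_append]
    have hnk : ∀ p ∈ d.items, (p.1 == k) = false := by
      intro p hp
      by_contra hb
      have hpk : p.1 = k := by simpa using hb
      have hmem : k ∈ d.keys := by
        have hk1 : p.1 ∈ List.map Prod.fst d.items := List.mem_map_of_mem hp
        rw [hpk] at hk1
        simpa [PySem.Dict.keys] using hk1
      exact hc ((PySem.Dict.contains_iff_mem_keys d k).mpr hmem)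
    have hid : List.map (fun p => if p.1 == k then (k, w) else p) d.items = d.items := by
      rw [List.map_congr_left (g := id) ?_, List.map_id]
      intro p hp; simp [hnk p hp]
    rw [hid]
    simp

theorem pvPowLe {num : Int} (hnum : 0 < num) {k : Nat} (h : (11:Int)^k ∣ num) :
    11^k ≤ num.natAbs := by
  have h1 : (11:Int)^k ≤ num := Int.le_of_dvd hnum h
  have h2 : ((11^k : Nat) : Int) ≤ num := by push_cast; exact h1
  omega

-- A's while loop: starting from prime_factors[11] = v and i = v + 1, it ends with prime_factors[11]
-- holding the full exponent of 11 in num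
theorem pvALoop_spec (num : Int) (hnum : 0 < num) :
    ∀ (fuel : Nat) (d : PySem.Dict Int Int) (v i : Int), 1 ≤ v → i = v + 1 →
    (11:Int)^(v.toNat) ∣ num → num.natAbs < 11^(fuel + i.toNat) →
    ∃ r : Int, pvALoop num fuel (d.insert 11 v) i = d.insert 11 r ∧ 1 ≤ r ∧
      (11:Int)^(r.toNat) ∣ num ∧ ¬ (11:Int)^(r.toNat+1) ∣ num := by
  intro fuel
  induction fuel with
  | zero =>
    intro d v i hv hi hdvd hb
    refine ⟨v, rfl, hv, hdvd, ?_⟩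
    intro hcon
    have hi' : i.toNat = v.toNat + 1 := by omega
    have hle := pvPowLe hnum hcon
    rw [hi'] at hb
    simp only [Nat.zero_add] at hb
    omega
  | succ f ih =>
    intro d v i hv hi hdvd hb
    rw [pvALoop]
    by_cases hc : PySem.Int.mod num (11 ^ i.toNat) = 0
    · rw [if_pos hc, PySem.Dict.getD_insert_self, pvInsert_insert]
      have hidvd : (11:Int)^(i.toNat) ∣ num := (PySem.Int.mod_eq_zero_iff_dvd _ _).mp hc
      have h1 : (1:Int) ≤ v + 1 := by omega
      have h2 : i + 1 = (v + 1) + 1 := by omega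
      have h3 : (11:Int)^((v+1).toNat) ∣ num := by
        rw [show (v+1).toNat = i.toNat by omega]; exact hidvd
      have h4 : num.natAbs < 11^(f + (i+1).toNat) := by
        rw [show f + (i+1).toNat = f + 1 + i.toNat by omega]; exact hb
      exact ih d (v+1) (i+1) h1 h2 h3 h4
    · rw [if_neg hc]
      refine ⟨v, rfl, hv, hdvd, ?_⟩
      intro hcon
      apply hc
      rw [PySem.Int.mod_eq_zero_iff_dvd]
      rw [show i.toNat = v.toNat + 1 by omega]
      exact hcon

-- B's divide-and-count loop extracts the full power of 11
theorem pvBLoop_spec :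
    ∀ (fuel : Nat) (n c : Int), 0 < n → n.natAbs < 11^fuel →
    ∃ (m : Int) (k : Nat), pvBLoop fuel n c = (m, c + (k : Int)) ∧ n = m * 11^k ∧ 0 < m ∧
      ¬ (11:Int) ∣ m := by
  intro fuel
  induction fuel with
  | zero => intro n c hn hb; simp at hb; omega
  | succ f ih =>
    intro n c hn hb
    rw [pvBLoop]
    by_cases hc : PySem.Int.mod n 11 = 0
    · rw [if_pos hc]
      obtain ⟨q, hq⟩ := (PySem.Int.mod_eq_zero_iff_dvd _ _).mp hc
      have hfd : PySem.Int.floordiv n 11 = q := by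
        rw [PySem.Int.floordiv_eq_ediv_of_pos (by norm_num), hq]
        exact Int.mul_ediv_cancel_left q (by norm_num)
      have hq0 : 0 < q := by
        by_contra h
        have hq' : q ≤ 0 := by omega
        nlinarith
      have hqb : q.natAbs < 11^f := by
        have : n.natAbs = 11 * q.natAbs := by rw [hq]; simp [Int.natAbs_mul]
        have hp : (11:Nat)^(f+1) = 11 * 11^f := by ring
        omega
      obtain ⟨m, k, heq, hfact, hm, hnd⟩ := ih q (c + 1) hq0 hqb
      refine ⟨m, k + 1, ?_, ?_, hm, hnd⟩
      · rw [hfd, heq]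
        congr 1
        push_cast
        ring
      · rw [hq, hfact]; ring
    · rw [if_neg hc]
      refine ⟨n, 0, by simp, by simp, hn, ?_⟩
      rw [← PySem.Int.mod_eq_zero_iff_dvd]
      exact hc

theorem pvVal_unique {num m : Int} {r k : Nat} (hfact : num = m * 11^k)
    (hm : ¬ (11:Int) ∣ m) (hdvd : (11:Int)^r ∣ num) (hnd : ¬ (11:Int)^(r+1) ∣ num) : r = k := by
  rcases lt_trichotomy r k with h | h | h
  · exact absurd (dvd_trans (pow_dvd_pow 11 (by omega : r + 1 ≤ k)) ⟨m, by rw [hfact]; ring⟩) hnd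
  · exact h
  · exfalso
    apply hm
    have h1 : (11:Int)^(k+1) ∣ num := dvd_trans (pow_dvd_pow 11 (by omega)) hdvd
    rw [hfact, pow_succ, mul_comm ((11:Int)^k) 11] at h1
    exact (mul_dvd_mul_iff_right (pow_ne_zero k (by norm_num : (11:Int) ≠ 0))).mp h1

-- ===== VERDICT (by name: the statement is the Claim_ definition above) =====
theorem divisible_by_eleven_spec : Claim_equal_divisible_by_eleven := by
  intro num pf _
  unfold Spec_divisible_by_eleven divisible_by_eleven divisible_by_eleven_alt
  by_cases h1 : num < 11
  · simp [h1]
  · simp only [h1, if_false, decide_false, Bool.false_or]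
    by_cases h2 : (PySem.Dict.mk pf).contains 11 = true
    · simp only [h2, not_true, if_false, Bool.not_true]
      have hn : (0:Int) < num := by omega
      have hnum : ((num.toNat : Nat) : Int) = num := Int.toNat_of_nonneg (by omega)
      have hch : PySem.Int.toChars num = pvDigits num.toNat := by
        unfold PySem.Int.toChars
        rw [if_neg (by omega), pvToDigits_eq]
      have htest := pvTest_iff num.toNat
      rw [hnum] at htest
      by_cases hd : (11:Int) ∣ num
      · have hA : PySem.Int.mod (List.foldl pvStepA (0, 0) (PySem.Int.toChars num)).1 11 = 0 := by
          rw [hch]; exact htest.mpr hd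
        have hB : PySem.Int.mod num 11 = 0 := (PySem.Int.mod_eq_zero_iff_dvd _ _).mpr hd
        simp only [hA, hB, if_pos, not_true, if_false]
        -- B's loop
        have hbb : num.natAbs < 11^(num.toNat) := by
          have : num.toNat < 11^(num.toNat) := Nat.lt_pow_self (by norm_num)
          omega
        obtain ⟨m, k, heqB, hfact, hm0, hnd⟩ := pvBLoop_spec num.toNat num 0 hn hbb
        -- A's loop
        have hab : num.natAbs < 11^(num.toNat + (2:Int).toNat) := by
          have h2' : (11:Nat)^(num.toNat) ≤ 11^(num.toNat + (2:Int).toNat) :=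
            Nat.pow_le_pow_right (by norm_num) (by omega)
          omega
        obtain ⟨r, heqA, hr1, hrd, hrnd⟩ := pvALoop_spec num hn num.toNat
          (PySem.Dict.mk pf) 1 2 (by norm_num) (by norm_num)
          (by simpa using hd) hab
        have hrk : r.toNat = k := pvVal_unique hfact hnd hrd hrnd
        have hrval : r = (k : Int) := by omega
        rw [heqA, heqB, PySem.Dict.getD_insert_self]
        have hdiv : PySem.Int.floordiv num (11 ^ r.toNat) = m := by
          rw [PySem.Int.floordiv_eq_ediv_of_pos (by positivity), hrk, hfact]
          exact Int.mul_ediv_cancel m (by positivity)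
        rw [hdiv, hrval]
        simp
      · have hA : ¬ PySem.Int.mod (List.foldl pvStepA (0, 0) (PySem.Int.toChars num)).1 11 = 0 := by
          rw [hch]; exact fun hcon => hd (htest.mp hcon)
        have hB : ¬ PySem.Int.mod num 11 = 0 := fun hcon => hd ((PySem.Int.mod_eq_zero_iff_dvd _ _).mp hcon)
        rw [if_neg hA, if_pos hB]
        simp
    · simp [h2]
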